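-- pv_equiv track=rewrite | github.com/Hello-Worker/Algorithm_study | Group_study/06. 무지의 먹방 라이브.py | solution
-- ===== SOURCE A (Python) =====
-- def solution(food_times, k):
--     food_times_list = []
--     totalTime = 0
--
--     # 음식의 번호와 음식의 양을 저장
--     for i in range(0, len(food_times)):
--         food_times_list.append([i, food_times[i]])
--         totalTime += food_times[i]
--
--     # 전체 먹는 시간보다 k가 크면 계산 불가능 이므로 -1
--     if totalTime <= k:
--         return -1
--     # 음식 양이 적은 순으로 정렬
--     # key 인자에 함수를 넘겨주면 해당 함수의 반환값을 비교하여 순서대로 정렬한다.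
--     # c = sorted(a, key=lambda x: x[0])
--     # c = [(0, 1), (1, 2), (3, 0), (5, 1), (5, 2)]
--     food_times_list.sort(key=lambda x: x[1]) #1번째 인덱스 음식 양순으로 정렬
--
--     # 제일 적은 음식을 길이에 곱한 시간 계산
--     delTime = food_times_list[0][1] * len(food_times_list)
--     # i 사라진 음식의 개수
--     i = 1
--     # k 가 음식을 사라지게 하는 수보다 클 경우 아래 의 반복문 실행
--     while delTime < k: # 전체적으로 삭제되는양 < k
--         k -= delTime # k = k-delTime 전체 바퀴돌고 남은시간
--         delTime = (food_times_list[i][1] - food_times_list[i - 1][1]) * (len(food_times_list) - i)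
--         i += 1 ######################
--     # 인덱스 수순으로 배치
--     food_times_list = sorted(food_times_list[i - 1:], key=lambda x: x[0])
--     # k번쨰 음식의 인덱스를 출력
--     return food_times_list[k % len(food_times_list)][0] + 1
-- ===== SOURCE B (Python) =====
-- def solution(food_times, k):
--     if sum(food_times) <= k:
--         return -1
--     pairs = sorted(enumerate(food_times), key=lambda x: x[1])
--     n = len(pairs)
--     # cost[j] = total seconds needed to fully clear the j smallest foods (layer view)
--     cost = []
--     pre = 0
--     for j in range(n):
--         cost.append(pre + pairs[j][1] * (n - j))
--         pre += pairs[j][1]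
--     # binary search: least m with cost[m] >= k (cost is nondecreasing)
--     lo, hi = 0, n
--     while lo < hi:
--         mid = (lo + hi) // 2
--         if cost[mid] < k:
--             lo = mid + 1
--         else:
--             hi = mid
--     m = lo
--     rem = k - (cost[m - 1] if m > 0 else 0)
--     survivors = sorted(i for i, _ in pairs[m:])
--     return survivors[rem % (n - m)] + 1
-- ===== Notes on version B (the rewrite author's own statement) =====
-- stated objective: alternative
-- what changed: A peels layers with a stateful while-loop that repeatedly subtracts incremental delete-times from k; B precomputes a nondecreasing prefix-cost array over the sorted foods, locates the cut point with a hand-written binary search, recovers the leftover time in closed form, and picks the survivor from a plain sorted index list.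
-- outside the precondition, e.g. on solution([], -1): A raises IndexError, B raises ZeroDivisionError
import Mathlib
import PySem

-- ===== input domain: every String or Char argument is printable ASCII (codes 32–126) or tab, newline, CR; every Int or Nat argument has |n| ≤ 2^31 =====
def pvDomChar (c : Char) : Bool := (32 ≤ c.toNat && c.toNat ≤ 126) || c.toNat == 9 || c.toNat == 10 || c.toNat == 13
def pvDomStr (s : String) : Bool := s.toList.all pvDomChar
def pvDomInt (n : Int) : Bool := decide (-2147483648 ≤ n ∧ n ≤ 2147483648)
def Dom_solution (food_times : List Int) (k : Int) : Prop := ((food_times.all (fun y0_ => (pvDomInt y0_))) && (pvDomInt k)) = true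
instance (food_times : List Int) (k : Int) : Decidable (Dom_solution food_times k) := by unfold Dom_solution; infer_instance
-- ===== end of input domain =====

-- B replaces A's stateful layer-peeling loop by a prefix-cost array + binary search + closed-form leftover; same results proved equal.

-- ===== PORT A =====
-- the while loop of A: state (delTime, k, i); returns (final k, final i)
def solLoopA (s : List (Int × Int)) (fuel : Nat) (delTime k : Int) (i : Nat) : Int × Nat :=
  match fuel with
  | 0 => (k, i)          -- fuel bound (s.length at the call site is enough; never reached)
  | fuel' + 1 =>
    if delTime < k then
      match PySem.List.pyGet? s (i : Int), PySem.List.pyGet? s ((i : Int) - 1) with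
      | some cur, some prev =>
          solLoopA s fuel' ((cur.2 - prev.2) * ((s.length : Int) - (i : Int))) (k - delTime) (i + 1)
      | _, _ => (k, i)   -- IndexError in Python: unreachable under Pre_
    else (k, i)

def solution (food_times : List Int) (k : Int) : Int :=
  let built := (PySem.List.pyRange 0 (food_times.length : Int) 1).foldl
      (fun (acc : List (Int × Int) × Int) i =>
        (acc.1 ++ [(i, PySem.List.pyGetD food_times i 0)], acc.2 + PySem.List.pyGetD food_times i 0))
      ([], 0)
  if built.2 ≤ k then -1
  else
    let fl := PySem.List.sorted built.1 (fun x => x.2) false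
    match PySem.List.pyGet? fl 0 with
    | none => 0   -- IndexError in Python (empty list): unreachable under Pre_
    | some p0 =>
      let r := solLoopA fl fl.length (p0.2 * (fl.length : Int)) k 1
      let rest := PySem.List.sorted (PySem.List.slice fl (some ((r.2 : Int) - 1)) none) (fun x => x.1) false
      match PySem.Int.mod? r.1 (rest.length : Int) with
      | none => 0   -- ZeroDivisionError: unreachable under Pre_
      | some idx =>
        match PySem.List.pyGet? rest idx with
        | some q => q.1 + 1
        | none => 0   -- unreachable: 0 ≤ idx < rest.length

-- ===== PORT B =====
-- hand-written binary search of Source B: least index in [lo, hi) whose cost is ≥ k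
def solBsearch (cost : List Int) (k : Int) (fuel lo hi : Nat) : Nat :=
  match fuel with
  | 0 => lo              -- fuel bound (hi - lo at the call site; never reached)
  | fuel' + 1 =>
    if lo < hi then
      -- mid = (lo + hi) // 2: Python's floor division, exact on naturals
      if PySem.List.pyGetD cost (((lo + hi) / 2 : Nat) : Int) 0 < k then solBsearch cost k fuel' ((lo + hi) / 2 + 1) hi
      else solBsearch cost k fuel' lo ((lo + hi) / 2)
    else lo

def solution_alt (food_times : List Int) (k : Int) : Int :=
  if food_times.sum ≤ k then -1
  else
    let pairs := PySem.List.sorted (PySem.List.enumerate food_times) (fun x => x.2) false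
    let n := pairs.length
    let cost := ((PySem.List.pyRange 0 (n : Int) 1).foldl
        (fun (acc : List Int × Int) j =>
          (acc.1 ++ [acc.2 + (PySem.List.pyGetD pairs j (0, 0)).2 * ((n : Int) - j)],
           acc.2 + (PySem.List.pyGetD pairs j (0, 0)).2))
        ([], 0)).1
    let m := solBsearch cost k n 0 n
    let rem := k - (if 0 < m then PySem.List.pyGetD cost ((m : Int) - 1) 0 else 0)
    let survivors := PySem.List.sorted ((PySem.List.slice pairs (some (m : Int)) none).map (fun x => x.1)) (fun x => x) false
    match PySem.Int.mod? rem ((n : Int) - (m : Int)) with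
    | none => 0   -- ZeroDivisionError in Python: unreachable under Pre_
    | some j =>
      match PySem.List.pyGet? survivors j with
      | some v => v + 1
      | none => 0   -- unreachable: 0 ≤ j < survivors.length

-- ===== PRECONDITION & SPEC =====
-- Pre_ excludes only empty food_times with k < 0, where A raises IndexError (and B ZeroDivisionError).
def Pre_solution (food_times : List Int) (k : Int) : Prop := food_times = [] → 0 ≤ k
instance (food_times : List Int) (k : Int) : Decidable (Pre_solution food_times k) := by unfold Pre_solution; infer_instance
def pvWitness_solution : List Int × Int := ([3, 1, 2], 5)

def Spec_solution (food_times : List Int) (k : Int) (out : Int) : Prop := out = solution_alt food_times k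
instance (food_times : List Int) (k : Int) (out : Int) : Decidable (Spec_solution food_times k out) := by unfold Spec_solution; infer_instance

-- ===== CLAIM (what is proved, stated in full; the proofs are below) =====
def Claim_equal_solution : Prop := ∀ (food_times : List Int) (k : Int), Dom_solution food_times k → Pre_solution food_times k → Spec_solution food_times k (solution food_times k)

-- ===== LEMMAS AND PROOFS =====

-- abbreviations over the sorted pair list s
def pvA (s : List (Int × Int)) (j : Nat) : Int := (s.getD j (0, 0)).2
def pvSum (s : List (Int × Int)) (t : Nat) : Int := ((s.take t).map (fun x => x.2)).sum
def pvC (s : List (Int × Int)) (j : Nat) : Int := pvSum s j + pvA s j * ((s.length : Int) - (j : Int))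
def pvP (s : List (Int × Int)) : Nat → Int
  | 0 => 0
  | (j + 1) => pvC s j

theorem pvSum_succ (s : List (Int × Int)) (t : Nat) (ht : t < s.length) :
    pvSum s (t + 1) = pvSum s t + pvA s t := by
  unfold pvSum pvA
  rw [List.getD_eq_getElem s (0,0) ht]
  have h2 : t < (List.map (fun x => x.2 : Int × Int → Int) s).length := by simpa using ht
  rw [List.map_take, List.map_take, List.sum_take_succ _ t h2, List.getElem_map]

theorem foldl_build_pair (r : List Int) (g : Int → Int × Int) (h : Int → Int)
    (l0 : List (Int × Int)) (t0 : Int) :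
    r.foldl (fun acc i => (acc.1 ++ [g i], acc.2 + h i)) (l0, t0)
      = (l0 ++ r.map g, t0 + (r.map h).sum) := by
  induction r generalizing l0 t0 with
  | nil => simp
  | cons x xs ih => simp [ih]; ring

theorem costFold (s : List (Int × Int)) :
    ∀ (fuel t : Nat) (l0 : List Int), s.length - t ≤ fuel → t ≤ s.length →
      (PySem.List.pyRange (t : Int) (s.length : Int) 1).foldl
        (fun (acc : List Int × Int) j =>
          (acc.1 ++ [acc.2 + (PySem.List.pyGetD s j (0, 0)).2 * ((s.length : Int) - j)],
           acc.2 + (PySem.List.pyGetD s j (0, 0)).2))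
        (l0, pvSum s t)
      = (l0 ++ (List.range (s.length - t)).map (fun j => pvC s (t + j)), pvSum s s.length) := by
  intro fuel
  induction fuel with
  | zero =>
    intro t l0 hf ht
    have he : t = s.length := by omega
    subst he
    rw [PySem.List.pyRange_one_eq_nil le_rfl]
    simp
  | succ f ih =>
    intro t l0 hf ht
    by_cases hts : t = s.length
    · subst hts
      rw [PySem.List.pyRange_one_eq_nil le_rfl]
      simp
    · have htl : t < s.length := by omega
      rw [PySem.List.pyRange_one_cons (by push_cast; omega)]
      rw [List.foldl_cons]
      have hget : PySem.List.pyGetD s ((t : Nat) : Int) (0, 0) = s.getD t (0, 0) := by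
        simp [PySem.List.pyGetD_natCast]
      have e1 : pvSum s t + (PySem.List.pyGetD s ((t : Nat) : Int) (0, 0)).2 = pvSum s (t + 1) := by
        rw [hget, pvSum_succ s t htl]; rfl
      have e2 : pvSum s t + (PySem.List.pyGetD s ((t : Nat) : Int) (0, 0)).2 * ((s.length : Int) - ((t : Nat) : Int)) = pvC s t := by
        rw [hget]; rfl
      have e3 : ((t : Nat) : Int) + 1 = (((t + 1 : Nat)) : Int) := by push_cast; ring
      simp only [e1, e2, e3]
      rw [ih (t + 1) (l0 ++ [pvC s t]) (by omega) (by omega)]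
      have e4 : s.length - t = (s.length - (t + 1)) + 1 := by omega
      rw [e4, List.range_succ_eq_map]
      simp only [List.map_cons, List.map_map, Nat.add_zero, List.append_assoc, List.singleton_append, List.cons_append]
      congr 2
      simp only [List.nil_append]
      congr 1
      apply List.map_congr_left
      intro a _
      simp only [Function.comp_apply]
      congr 1
      omega

theorem pvC_succ_sub (s : List (Int × Int)) (t : Nat) (ht : t < s.length) :
    pvC s (t + 1) - pvC s t = (pvA s (t + 1) - pvA s t) * ((s.length : Int) - ((t + 1 : Nat) : Int)) := by
  have hs := pvSum_succ s t ht
  unfold pvC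
  rw [hs]
  push_cast
  ring

theorem loopA_spec (s : List (Int × Int)) (k0 : Int) (m : Nat)
    (hmn : m < s.length)
    (hQm : k0 ≤ pvC s m)
    (hlt : ∀ j, j < m → pvC s j < k0) :
    ∀ fuel t, m - t < fuel → t ≤ m →
      solLoopA s fuel (pvC s t - pvP s t) (k0 - pvP s t) (t + 1) = (k0 - pvP s m, m + 1) := by
  have H : ∀ (fuel t : Nat), m - t < fuel → t ≤ m →
      solLoopA s fuel (pvC s t - pvP s t) (k0 - pvP s t) (t + 1) = (k0 - pvP s m, m + 1) := by
    intro fuel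
    induction fuel with
    | zero =>
      intro t hf ht
      omega
    | succ f ih =>
      intro t hf ht
      by_cases htm : t = m
      · subst htm
        rw [solLoopA, if_neg (by omega : ¬ pvC s t - pvP s t < k0 - pvP s t)]
      · have htlt : t < m := by omega
        have hcnd : pvC s t - pvP s t < k0 - pvP s t := by have := hlt t htlt; omega
        have ht1 : t + 1 < s.length := by omega
        have h1 : PySem.List.pyGet? s ((t + 1 : Nat) : Int) = some s[t + 1] := by
          rw [PySem.List.pyGet?_natCast, List.getElem?_eq_getElem ht1]
        have h2 : PySem.List.pyGet? s (((t + 1 : Nat) : Int) - 1) = some s[t] := by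
          have e : (((t + 1 : Nat) : Int)) - 1 = ((t : Nat) : Int) := by push_cast; ring
          rw [e, PySem.List.pyGet?_natCast, List.getElem?_eq_getElem (by omega : t < s.length)]
        rw [solLoopA, if_pos hcnd]
        have harg : (s[t + 1].2 - s[t].2) * ((s.length : Int) - ((t + 1 : Nat) : Int))
            = pvC s (t + 1) - pvP s (t + 1) := by
          have := pvC_succ_sub s t (by omega)
          have ha1 : pvA s (t + 1) = s[t + 1].2 := by
            unfold pvA; rw [List.getD_eq_getElem s (0, 0) ht1]
          have ha0 : pvA s t = s[t].2 := by
            unfold pvA; rw [List.getD_eq_getElem s (0, 0) (by omega : t < s.length)]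
          show _ = pvC s (t + 1) - pvC s t
          rw [this, ha1, ha0]
        have hk : k0 - pvP s t - (pvC s t - pvP s t) = k0 - pvP s (t + 1) := by
          show _ = k0 - pvC s t
          ring
        split
        case _ cur prev hA hB =>
          rw [h1] at hA
          rw [h2] at hB
          cases hA; cases hB
          rw [harg, hk]
          exact ih (t + 1) (by omega) (by omega)
        case _ hno =>
          exact (hno s[t + 1] s[t] h1 h2).elim
  exact H

theorem bsearch_spec (cost : List Int) (k0 : Int) (n m : Nat) (C : Nat → Int)
    (hcost : ∀ j, j < n → PySem.List.pyGetD cost (j : Int) 0 = C j)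
    (hmono : ∀ p q, p ≤ q → q < n → C p ≤ C q)
    (hQm : k0 ≤ C m)
    (hlt : ∀ j, j < m → C j < k0) :
    ∀ fuel lo hi, hi - lo ≤ fuel → lo ≤ m → m ≤ hi → hi ≤ n → solBsearch cost k0 fuel lo hi = m := by
  intro fuel
  induction fuel with
  | zero =>
    intro lo hi hf h1 h2 h3
    rw [solBsearch]
    omega
  | succ f ih =>
    intro lo hi hf h1 h2 h3
    rw [solBsearch]
    by_cases hlh : lo < hi
    · rw [if_pos hlh]
      have hcm := hcost ((lo + hi) / 2) (by omega)
      by_cases hc : PySem.List.pyGetD cost (((lo + hi) / 2 : Nat) : Int) 0 < k0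
      · rw [if_pos hc]
        have hmid : (lo + hi) / 2 < m := by
          by_contra hge
          have hle : C m ≤ C ((lo + hi) / 2) := hmono m ((lo + hi) / 2) (by omega) (by omega)
          rw [hcm] at hc; omega
        exact ih ((lo + hi) / 2 + 1) hi (by omega) (by omega) h2 h3
      · rw [if_neg hc]
        have hmid : m ≤ (lo + hi) / 2 := by
          by_contra hgt
          have := hlt ((lo + hi) / 2) (by omega)
          rw [hcm] at hc; omega
        exact ih lo ((lo + hi) / 2) (by omega) h1 hmid (by omega)
    · rw [if_neg hlh]; omega

theorem map_fst_sorted (l : List (Int × Int)) :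
    PySem.List.sorted (l.map (fun x => x.1)) (fun x => x) false
      = (PySem.List.sorted l (fun x => x.1) false).map (fun x => x.1) := by
  apply PySem.List.sorted_id_eq_of_perm_of_pairwise
  · exact ((PySem.List.sorted_perm l (fun x => x.1) false).map _)
  · exact (PySem.List.sorted_pairwise l (fun x => x.1)).map _ (by intro a b hab; simpa using hab)

theorem solution_eq_alt (food_times : List Int) (k : Int)
    (hpre : Pre_solution food_times k) :
    solution food_times k = solution_alt food_times k := by
  have henum : List.map (fun i => (i, PySem.List.pyGetD food_times i 0)) (PySem.List.pyRange 0 (food_times.length : Int) 1) = PySem.List.enumerate food_times := by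
    rw [PySem.List.enumerate_eq_map_pyRange (d := 0)]
    simp [PySem.List.len_eq]
  unfold solution solution_alt
  rw [foldl_build_pair]
  simp only [List.nil_append, zero_add]
  rw [PySem.List.map_pyGetD_pyRange_zero']
  rw [henum]
  by_cases hg : food_times.sum ≤ k
  · rw [if_pos hg, if_pos hg]
  · rw [if_neg hg, if_neg hg]
    set s := PySem.List.sorted (PySem.List.enumerate food_times) (fun x => x.2) false with hs
    have hfne : food_times ≠ [] := by
      intro he
      subst he
      simp at hg
      exact absurd (hpre rfl) (by omega)
    have hsl : s.length = food_times.length := by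
      rw [hs, PySem.List.length_sorted, PySem.List.length_enumerate]
    have hn : 0 < s.length := by
      rw [hsl]
      cases food_times with
      | nil => exact absurd rfl hfne
      | cons a l => simp
    have hsum : (s.map (fun x => x.2)).sum = food_times.sum := by
      have hperm := (PySem.List.sorted_perm (PySem.List.enumerate food_times) (fun x => x.2) false).map (fun x : Int × Int => x.2)
      rw [List.Perm.sum_eq hperm, PySem.List.map_snd_enumerate]
    have hsumtake : pvSum s s.length = food_times.sum := by
      unfold pvSum
      rw [List.take_length]
      exact hsum
    have hlast : pvC s (s.length - 1) = food_times.sum := by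
      have h1 : pvSum s ((s.length - 1) + 1) = pvSum s (s.length - 1) + pvA s (s.length - 1) := pvSum_succ s _ (by omega)
      have h2 : (s.length - 1) + 1 = s.length := by omega
      rw [h2] at h1
      unfold pvC
      have h3 : ((s.length : Int) - ((s.length - 1 : Nat) : Int)) = 1 := by
        have : ((s.length - 1 : Nat) : Int) = (s.length : Int) - 1 := by
          push_cast [Nat.cast_sub (by omega : 1 ≤ s.length)]; ring
        rw [this]; ring
      rw [h3, mul_one, ← h1, hsumtake]
    have hQex : ∃ j, k ≤ pvC s j := ⟨s.length - 1, by rw [hlast]; omega⟩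
    have hQm : k ≤ pvC s (Nat.find hQex) := Nat.find_spec hQex
    set m := Nat.find hQex with hm
    have hltm : ∀ j, j < m → pvC s j < k := by
      intro j hj
      have := Nat.find_min hQex hj
      omega
    have hmlt : m < s.length := by
      have : m ≤ s.length - 1 := Nat.find_min' hQex (by rw [hlast]; omega)
      omega
    have hstep : ∀ j, j + 1 < s.length → pvC s j ≤ pvC s (j + 1) := by
      intro j hj
      have hd := pvC_succ_sub s j (by omega)
      have ha : pvA s j ≤ pvA s (j + 1) := by
        unfold pvA
        rw [List.getD_eq_getElem s (0,0) (by omega : j < s.length), List.getD_eq_getElem s (0,0) hj]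
        exact PySem.List.key_sorted_getElem_mono (PySem.List.enumerate food_times) (fun x => x.2) (Nat.le_succ j) (by exact hj)
      have hpos : (0:Int) ≤ (s.length : Int) - ((j + 1 : Nat) : Int) := by push_cast; omega
      nlinarith [hd]
    have hmono : ∀ p q, p ≤ q → q < s.length → pvC s p ≤ pvC s q := by
      intro p q hpq hq
      induction q with
      | zero =>
        have : p = 0 := by omega
        simp [this]
      | succ q ih =>
        by_cases hpq1 : p = q + 1
        · subst hpq1; exact le_rfl
        · exact le_trans (ih (by omega) (by omega)) (hstep q hq)
    -- A side
    have hp0 : PySem.List.pyGet? s 0 = some s[0] := by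
      rw [PySem.List.pyGet?_zero, List.getElem?_eq_getElem hn]
    have hinit : s[0].2 * (s.length : Int) = pvC s 0 - pvP s 0 := by
      have ha0 : pvA s 0 = s[0].2 := by
        unfold pvA; rw [List.getD_eq_getElem s (0,0) hn]
      simp [pvC, pvP, pvSum, ha0]
    have hloopinit : solLoopA s s.length (s[0].2 * (s.length : Int)) k 1 = (k - pvP s m, m + 1) := by
      have h0 := loopA_spec s k m hmlt hQm hltm s.length 0 (by omega) (by omega)
      rw [hinit]
      simpa [pvP] using h0
    clear_value m
    have hml : m ≤ s.length := le_of_lt hmlt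
    -- A side: reduce the head lookup and the loop
    simp only [hp0, hloopinit]
    have hcast1 : (((m + 1 : Nat)) : Int) - 1 = ((m : Nat) : Int) := by push_cast; ring
    simp only [hcast1, PySem.List.slice_from_natCast]
    -- B side: the cost list
    have hcostL : (PySem.List.pyRange 0 (s.length : Int) 1).foldl
        (fun (acc : List Int × Int) j =>
          (acc.1 ++ [acc.2 + (PySem.List.pyGetD s j (0, 0)).2 * ((s.length : Int) - j)],
           acc.2 + (PySem.List.pyGetD s j (0, 0)).2))
        ([], 0)
        = ((List.range s.length).map (fun j => pvC s j), pvSum s s.length) := by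
      have h := costFold s s.length 0 [] (by omega) (by omega)
      simpa [pvSum] using h
    simp only [hcostL]
    have hcostget : ∀ j, j < s.length → PySem.List.pyGetD ((List.range s.length).map (fun j => pvC s j)) ((j : Nat) : Int) 0 = pvC s j := by
      intro j hj
      rw [PySem.List.pyGetD_natCast]
      rw [List.getD_eq_getElem _ _ (by simpa using hj)]
      simp
    have hbs : solBsearch ((List.range s.length).map (fun j => pvC s j)) k s.length 0 s.length = m :=
      bsearch_spec _ k s.length m (pvC s) hcostget hmono hQm hltm s.length 0 s.length (by omega) (by omega) (by omega) le_rfl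
    simp only [hbs]
    have hrem : k - (if 0 < m then PySem.List.pyGetD ((List.range s.length).map (fun j => pvC s j)) ((m : Int) - 1) 0 else 0) = k - pvP s m := by
      by_cases hm0 : 0 < m
      · rw [if_pos hm0]
        have e : ((m : Int) - 1) = ((m - 1 : Nat) : Int) := by
          push_cast [Nat.cast_sub (by omega : 1 ≤ m)]; ring
        rw [e, PySem.List.pyGetD_natCast, List.getD_eq_getElem _ _ (by simp; omega)]
        have hp : pvP s m = pvC s (m - 1) := by
          obtain ⟨m', rfl⟩ := Nat.exists_eq_add_of_lt hm0
          simp [pvP]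
        rw [hp]
        simp
      · rw [if_neg hm0]
        have : m = 0 := by omega
        subst this
        simp [pvP]
    rw [hrem]
    -- survivors
    rw [map_fst_sorted (List.drop m s)]
    -- divisors agree
    have hrl : (PySem.List.sorted (List.drop m s) (fun x => x.1) false).length = s.length - m := by
      rw [PySem.List.length_sorted, List.length_drop]
    have hdiv : (s.length : Int) - (m : Int) = ((s.length - m : Nat) : Int) := by
      push_cast [Nat.cast_sub hml]; ring
    rw [hrl, hdiv]
    -- the modulus
    have hdm0 : (0 : Int) < ((s.length - m : Nat) : Int) := by
      exact_mod_cast Nat.sub_pos_of_lt hmlt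
    have hmodeq : PySem.Int.mod? (k - pvP s m) ((s.length - m : Nat) : Int)
        = some (PySem.Int.mod (k - pvP s m) ((s.length - m : Nat) : Int)) := by
      simp [PySem.Int.mod?, PySem.Int.mod]
      omega
    rw [hmodeq]
    set idx := PySem.Int.mod (k - pvP s m) ((s.length - m : Nat) : Int) with hidx
    have hidx0 : 0 ≤ idx := PySem.Int.mod_nonneg _ hdm0
    have hidxlt : idx < ((s.length - m : Nat) : Int) := PySem.Int.mod_lt _ hdm0
    -- final lookups
    have hA : PySem.List.pyGet? (PySem.List.sorted (List.drop m s) (fun x => x.1) false) idx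
        = some ((PySem.List.sorted (List.drop m s) (fun x => x.1) false)[idx.toNat]'(by
            have : idx < ((PySem.List.sorted (List.drop m s) (fun x => x.1) false).length : Int) := by
              rw [hrl]; exact hidxlt
            omega)) :=
      PySem.List.pyGet?_eq_some_getElem _ hidx0 (by rw [hrl]; exact hidxlt)
    have hB : PySem.List.pyGet? ((PySem.List.sorted (List.drop m s) (fun x => x.1) false).map (fun x => x.1)) idx
        = some (((PySem.List.sorted (List.drop m s) (fun x => x.1) false).map (fun x => x.1))[idx.toNat]'(by
            have : idx < (((PySem.List.sorted (List.drop m s) (fun x => x.1) false).map (fun x => x.1)).length : Int) := by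
              simp only [List.length_map]; rw [hrl]; exact hidxlt
            omega)) :=
      PySem.List.pyGet?_eq_some_getElem _ hidx0 (by simp only [List.length_map]; rw [hrl]; exact hidxlt)
    simp only [hA, hB]
    simp [List.getElem_map]

-- ===== VERDICT (by name: the statement is the Claim_ definition above) =====
theorem solution_spec : Claim_equal_solution := by
  intro f k _ hpre
  unfold Spec_solution
  exact solution_eq_alt f k hpre
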